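-- pv_equiv track=rewrite | github.com/AlexK-Notable/znote-mcp | src/znote_mcp/utils.py | sanitize_for_terminal
-- ===== SOURCE A (Python) =====
-- def sanitize_for_terminal(text: str) -> str:
--     """Sanitize text for terminal-friendly filenames and directory names.
--
--     Converts text to a format that:
--     - Contains no spaces (uses hyphens between words)
--     - Uses only alphanumeric characters, hyphens, and underscores
--     - Is easy to type and tab-complete in terminal
--
--     Examples:
--         "Architecture Plan: znote-anamnesis Integration" -> "Architecture-Plan-Znote-Anamnesis-Integration"
--         "Hub: My Notes" -> "Hub-My-Notes"
--         "test_note" -> "test_note"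
--
--     Args:
--         text: The text to sanitize.
--
--     Returns:
--         Terminal-friendly string with no spaces.
--     """
--     if not text:
--         return ""
--
--     # Replace common separators and special chars with spaces first (for word splitting)
--     result = (
--         text.replace(":", " ").replace(";", " ").replace("/", " ").replace("\\", " ")
--     )
--
--     # Split into words, filter empty, rejoin with hyphens
--     words = result.split()
--
--     # Sanitize each word: keep only alphanumeric, hyphens, underscores
--     sanitized_words = []
--     for word in words:
--         sanitized_word = "".join(c if c.isalnum() or c in "-_" else "" for c in word)
--         if sanitized_word:
--             sanitized_words.append(sanitized_word)
--
--     return "-".join(sanitized_words)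
-- ===== SOURCE B (Python) =====
-- def sanitize_for_terminal(text: str) -> str:
--     """Single left-to-right pass: buffer the current word, flush at separators."""
--     tokens = []
--     buf = []
--     for c in text:
--         if c.isspace() or c in ":;/\\":
--             if buf:
--                 tokens.append("".join(buf))
--             buf = []
--         elif c.isalnum() or c in "-_":
--             buf.append(c)
--     if buf:
--         tokens.append("".join(buf))
--     return "-".join(tokens)
-- ===== Notes on version B (the rewrite author's own statement) =====
-- stated objective: alternative
-- what changed: Replaces A's multi-pass pipeline (four replace passes, split, per-word filter-join, rejoin) by one left-to-right pass over the characters with a current-token buffer and a token list.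
import Mathlib
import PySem

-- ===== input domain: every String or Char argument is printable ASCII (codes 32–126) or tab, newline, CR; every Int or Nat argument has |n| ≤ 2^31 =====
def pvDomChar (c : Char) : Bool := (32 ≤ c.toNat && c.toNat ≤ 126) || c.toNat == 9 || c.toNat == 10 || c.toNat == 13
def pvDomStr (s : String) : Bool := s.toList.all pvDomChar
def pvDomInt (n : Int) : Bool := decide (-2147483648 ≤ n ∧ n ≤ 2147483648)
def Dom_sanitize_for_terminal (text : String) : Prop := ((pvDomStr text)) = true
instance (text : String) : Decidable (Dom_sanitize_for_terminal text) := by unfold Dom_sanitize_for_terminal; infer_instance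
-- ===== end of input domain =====

-- B replaces A's multi-pass pipeline (replace ×4, split, per-word filter, rejoin) by one
-- left-to-right pass with a current-token buffer; same return value (alternative decomposition).

-- ===== PORT A =====
def sanitize_for_terminal (text : String) : String :=
  if text = "" then ""
  else
    let result := PySem.Str.replace (PySem.Str.replace (PySem.Str.replace
      (PySem.Str.replace text ":" " ") ";" " ") "/" " ") "\\" " "
    let words := PySem.Str.split₀ result
    let sanitized_words := words.foldl (fun acc word =>
      let sanitized_word := PySem.Str.join ""
        (word.toList.map (fun c =>
          if PySem.Chars.isalnum c || c == '-' || c == '_' then String.ofList [c] else ""))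
      if sanitized_word ≠ "" then acc ++ [sanitized_word] else acc) ([] : List String)
    PySem.Str.join "-" sanitized_words

-- ===== PORT B =====
def sanitize_for_terminal_alt (text : String) : String :=
  let s := text.toList.foldl (fun (s : List String × List Char) c =>
      if PySem.Chars.isspace c || c == ':' || c == ';' || c == '/' || c == '\\' then
        (if s.2.isEmpty then s.1 else s.1 ++ [String.ofList s.2], [])
      else if PySem.Chars.isalnum c || c == '-' || c == '_' then (s.1, s.2 ++ [c])
      else s)
    (([] : List String), ([] : List Char))
  let tokens := if s.2.isEmpty then s.1 else s.1 ++ [String.ofList s.2]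
  PySem.Str.join "-" tokens

-- ===== PRECONDITION & SPEC =====
def Spec_sanitize_for_terminal (text : String) (out : String) : Prop := out = sanitize_for_terminal_alt text
instance (text : String) (out : String) : Decidable (Spec_sanitize_for_terminal text out) := by unfold Spec_sanitize_for_terminal; infer_instance

-- ===== CLAIM (what is proved, stated in full; the proofs are below) =====
def Claim_equal_sanitize_for_terminal : Prop := ∀ (text : String), Dom_sanitize_for_terminal text → Spec_sanitize_for_terminal text (sanitize_for_terminal text)

-- ===== LEMMAS AND PROOFS =====
def pvSubst1 (a b : Char) (c : Char) : Char := if c = a then b else c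

lemma replace_go_single (a b : Char) : ∀ (l : List Char) (fuel : Nat) (acc : List Char),
    l.length ≤ fuel →
    PySem.Chars.replace.go [a] [b] fuel l acc = acc.reverse ++ l.map (pvSubst1 a b) := by
  intro l
  induction l with
  | nil => intro fuel acc _; cases fuel <;> simp [PySem.Chars.replace.go]
  | cons c t ih =>
    intro fuel acc h
    cases fuel with
    | zero => simp at h
    | succ f =>
      simp only [PySem.Chars.replace.go]
      by_cases hc : c = a
      · subst hc
        have : List.isPrefixOf [c] (c :: t) = true := by simp [List.isPrefixOf]
        rw [if_pos this]
        simp only [List.length_cons] at h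
        simp only [List.length_singleton, List.drop_one, List.tail_cons]
        rw [ih f ([b].reverse ++ acc) (Nat.le_of_succ_le_succ h)]
        simp [pvSubst1]
      · have : List.isPrefixOf [a] (c :: t) = false := by
          simp [List.isPrefixOf]; exact fun h => absurd h.symm hc
        rw [if_neg (by simp [this])]
        rw [ih f (c :: acc) (by simpa using Nat.le_of_succ_le_succ h)]
        simp [pvSubst1, hc]

lemma replace_single (s : List Char) (a b : Char) :
    PySem.Chars.replace s [a] [b] = s.map (pvSubst1 a b) := by
  simp only [PySem.Chars.replace, List.isEmpty_cons, Bool.false_eq_true, if_false]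
  exact replace_go_single a b s s.length [] (le_refl _)

def pvSubst (c : Char) : Char := if c == ':' || c == ';' || c == '/' || c == '\\' then ' ' else c

lemma subst_chain (c : Char) :
    pvSubst1 '\\' ' ' (pvSubst1 '/' ' ' (pvSubst1 ';' ' ' (pvSubst1 ':' ' ' c))) = pvSubst c := by
  simp only [pvSubst1, pvSubst]
  split_ifs <;> simp_all

def pvSplitF : List Char → List Char → List (List Char)
  | cur, [] => if cur.isEmpty then [] else [cur.reverse]
  | cur, c :: ds => if PySem.Chars.isspace c then
      (if cur.isEmpty then pvSplitF [] ds else cur.reverse :: pvSplitF [] ds)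
    else pvSplitF (c :: cur) ds

lemma split₀_go_eq : ∀ (ds cur : List Char) (acc : List (List Char)),
    PySem.Chars.split₀.go ds cur acc = acc.reverse ++ pvSplitF cur ds := by
  intro ds
  induction ds with
  | nil => intro cur acc; simp [PySem.Chars.split₀.go, pvSplitF]; split_ifs <;> simp
  | cons c ds ih =>
    intro cur acc
    simp only [PySem.Chars.split₀.go, pvSplitF]
    split_ifs with h1 h2 <;> simp [ih]

lemma split₀_eq (cs : List Char) : PySem.Chars.split₀ cs = pvSplitF [] cs := by
  simp [PySem.Chars.split₀, split₀_go_eq]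

def pvSep (c : Char) : Bool := PySem.Chars.isspace c || c == ':' || c == ';' || c == '/' || c == '\\'
def pvKeep (c : Char) : Bool := PySem.Chars.isalnum c || c == '-' || c == '_'

def pvT : List Char → List Char → List (List Char)
  | buf, [] => if buf.isEmpty then [] else [buf]
  | buf, c :: cs => if pvSep c then (if buf.isEmpty then pvT [] cs else buf :: pvT [] cs)
      else if pvKeep c then pvT (buf ++ [c]) cs else pvT buf cs

lemma main_G : ∀ (cs cur : List Char),
    ((pvSplitF cur (cs.map pvSubst)).filter (fun w => !(w.filter pvKeep).isEmpty)).map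
        (fun w => w.filter pvKeep)
      = pvT (cur.reverse.filter pvKeep) cs := by
  intro cs
  induction cs with
  | nil =>
    intro cur
    simp only [List.map_nil, pvSplitF, pvT]
    by_cases h : cur.isEmpty
    · simp_all
    · simp only [h, if_false]
      by_cases h3 : (cur.reverse.filter pvKeep).isEmpty <;> simp_all
  | cons c cs ih =>
    intro cur
    simp only [List.map_cons, pvSplitF, pvT]
    by_cases hsep : pvSep c
    · have hsp2 : PySem.Chars.isspace (pvSubst c) = true := by
        by_cases hm : (c == ':' || c == ';' || c == '/' || c == '\\') = true
        · rw [show pvSubst c = ' ' from by simp [pvSubst, hm]]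
          decide
        · have hs : PySem.Chars.isspace c = true := by
            simp only [pvSep, Bool.or_eq_true] at hsep
            simp only [Bool.or_eq_true] at hm
            tauto
          have : pvSubst c = c := by
            simp only [pvSubst]
            rw [if_neg]
            simp only [Bool.or_eq_true] at hm ⊢
            exact hm
          rw [this]
          exact hs
      simp only [hsp2, if_true, hsep, if_true]
      have h0 := ih []
      simp only [List.filter_nil, List.reverse_nil] at h0
      by_cases hc : cur.isEmpty
      · obtain rfl : cur = [] := List.isEmpty_iff.mp hc
        simpa using h0
      · simp only [hc, Bool.false_eq_true, if_false]
        by_cases hb : (cur.reverse.filter pvKeep).isEmpty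
        · rw [if_pos hb, List.filter_cons]
          simp only [hb, Bool.not_true, Bool.false_eq_true, if_false]
          exact h0
        · have hbf : (cur.reverse.filter pvKeep).isEmpty = false := by simpa using hb
          rw [if_neg hb, List.filter_cons]
          simp only [hbf, Bool.not_false, if_true, List.map_cons, h0]
    · have hsep' := hsep
      simp only [pvSep, Bool.or_eq_true, not_or] at hsep'
      have hsub : pvSubst c = c := by
        simp only [pvSubst]
        rw [if_neg]
        simp only [Bool.or_eq_true, not_or]
        tauto
      have hsp : PySem.Chars.isspace c = false := by
        rw [Bool.eq_false_iff]
        tauto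
      simp only [hsub, hsp, Bool.false_eq_true, if_false, hsep]
      rw [ih (c :: cur)]
      by_cases hk : pvKeep c <;>
        simp [hk, List.filter_append, List.filter_cons]

lemma foldB (cs : List Char) : ∀ (toks : List String) (buf : List Char),
    (let s := cs.foldl (fun (s : List String × List Char) c =>
        if PySem.Chars.isspace c || c == ':' || c == ';' || c == '/' || c == '\\' then
          (if s.2.isEmpty then s.1 else s.1 ++ [String.ofList s.2], [])
        else if PySem.Chars.isalnum c || c == '-' || c == '_' then (s.1, s.2 ++ [c])
        else s) (toks, buf);
      if s.2.isEmpty then s.1 else s.1 ++ [String.ofList s.2])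
    = toks ++ (pvT buf cs).map String.ofList := by
  induction cs with
  | nil =>
    intro toks buf
    simp only [List.foldl_nil, pvT]
    by_cases h : buf.isEmpty <;> simp [h]
  | cons c cs ih =>
    intro toks buf
    simp only [List.foldl_cons, pvT]
    by_cases hsep : (PySem.Chars.isspace c || c == ':' || c == ';' || c == '/' || c == '\\') = true
    · have hsep' : pvSep c = true := hsep
      simp only [hsep, if_true, hsep', if_true]
      by_cases hb : buf.isEmpty
      · simp only [hb, if_true]
        exact ih toks []
      · simp only [hb, Bool.false_eq_true, if_false]
        rw [ih (toks ++ [String.ofList buf]) []]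
        simp
    · have hsep' : pvSep c = false := by simpa [pvSep] using hsep
      simp only [hsep, Bool.false_eq_true, if_false, hsep']
      by_cases hk : (PySem.Chars.isalnum c || c == '-' || c == '_') = true
      · have hk' : pvKeep c = true := hk
        simp only [hk, if_true, hk', if_true]
        exact ih toks (buf ++ [c])
      · have hk' : pvKeep c = false := by simpa [pvKeep] using hk
        simp only [hk, Bool.false_eq_true, if_false, hk']
        exact ih toks buf

lemma ic_nil (xs : List (List Char)) : List.intercalate ([] : List Char) xs = xs.flatten := by
  induction xs with
  | nil => simp [List.intercalate]
  | cons a xs ih =>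
    cases xs with
    | nil => simp [List.intercalate]
    | cons b xs =>
      simp [List.intercalate, List.intersperse] at ih ⊢
      simpa using ih

lemma inner_join (l : List Char) :
    (PySem.Str.join "" (l.map (fun c =>
      if PySem.Chars.isalnum c || c == '-' || c == '_' then String.ofList [c] else ""))).toList
    = l.filter pvKeep := by
  rw [PySem.Str.toList_join]
  show List.intercalate "".toList _ = _
  rw [show "".toList = ([] : List Char) from rfl, ic_nil]
  induction l with
  | nil => simp
  | cons c l ih =>
    by_cases hk : (PySem.Chars.isalnum c || c == '-' || c == '_') = true
    · have hk' : pvKeep c = true := hk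
      simp only [List.map_cons, hk, if_true, List.flatten_cons, List.filter_cons, hk', ih]
      simp
    · have hk' : pvKeep c = false := by
        simp only [pvKeep]
        exact Bool.eq_false_iff.mpr hk
      simp only [List.map_cons, hk, Bool.false_eq_true, if_false, List.flatten_cons,
        List.filter_cons, hk', ih]
      simp

theorem pv_ports_agree (text : String) : sanitize_for_terminal text = sanitize_for_terminal_alt text := by
  have hB : sanitize_for_terminal_alt text
      = PySem.Str.join "-" ((pvT [] text.toList).map String.ofList) := by
    simp only [sanitize_for_terminal_alt]
    rw [foldB text.toList [] []]
    simp
  by_cases h0 : text = ""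
  · subst h0
    rw [hB]
    decide
  · -- main branch
    rw [sanitize_for_terminal, if_neg h0, hB]
    apply String.toList_inj.mp
    -- A's word fold
    have hfun : (fun (acc : List String) word =>
        let sanitized_word := PySem.Str.join ""
          (word.toList.map (fun c =>
            if PySem.Chars.isalnum c || c == '-' || c == '_' then String.ofList [c] else ""))
        if sanitized_word ≠ "" then acc ++ [sanitized_word] else acc)
      = (fun acc w => if (fun w => decide ((PySem.Str.join ""
          (String.toList w |>.map (fun c =>
            if PySem.Chars.isalnum c || c == '-' || c == '_' then String.ofList [c] else ""))) ≠ "")) w = true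
          then acc ++ [(fun w => PySem.Str.join ""
          (String.toList w |>.map (fun c =>
            if PySem.Chars.isalnum c || c == '-' || c == '_' then String.ofList [c] else ""))) w] else acc) := by
      funext acc w
      simp
    simp only [hfun]
    rw [PySem.List.foldl_append_if]
    rw [PySem.Str.toList_join, PySem.Str.toList_join]
    refine congrArg (PySem.Chars.join "-".toList) ?_
    rw [List.nil_append, List.map_map, List.map_map]
    have htof : (String.toList ∘ String.ofList) = (id : List Char → List Char) := by
      funext l; simp
    rw [htof, List.map_id]
    -- predicate and map rewriting on the A side
    have hp : (fun w => decide ((PySem.Str.join ""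
          (String.toList w |>.map (fun c =>
            if PySem.Chars.isalnum c || c == '-' || c == '_' then String.ofList [c] else ""))) ≠ ""))
        = ((fun l => !(l.filter pvKeep).isEmpty) ∘ String.toList) := by
      funext w
      have h := inner_join w.toList
      simp only [Function.comp_apply, ne_eq, ← String.toList_inj, h]
      cases he : (List.filter pvKeep w.toList).isEmpty <;>
        simp_all [List.isEmpty_iff, List.filter_eq_nil_iff]
    have hg : (String.toList ∘ fun w => PySem.Str.join ""
          (String.toList w |>.map (fun c =>
            if PySem.Chars.isalnum c || c == '-' || c == '_' then String.ofList [c] else "")))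
        = ((fun l => l.filter pvKeep) ∘ String.toList) := by
      funext w
      exact inner_join w.toList
    rw [hp, hg, ← List.map_map, ← List.filter_map, PySem.Str.split₀_map_toList]
    rw [PySem.Str.toList_replace, PySem.Str.toList_replace, PySem.Str.toList_replace,
      PySem.Str.toList_replace]
    rw [show (":" : String).toList = [':'] from rfl, show (";" : String).toList = [';'] from rfl,
      show ("/" : String).toList = ['/'] from rfl, show ("\\" : String).toList = ['\\'] from rfl,
      show (" " : String).toList = [' '] from rfl]
    rw [replace_single, replace_single, replace_single, replace_single]
    rw [List.map_map, List.map_map, List.map_map]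
    have hcomp : ((pvSubst1 '\\' ' ' ∘ pvSubst1 '/' ' ') ∘ pvSubst1 ';' ' ') ∘ pvSubst1 ':' ' '
        = pvSubst := by
      funext c
      exact subst_chain c
    rw [hcomp, split₀_eq]
    have := main_G text.toList []
    simpa using this

-- ===== VERDICT (by name: the statement is the Claim_ definition above) =====
theorem sanitize_for_terminal_spec : Claim_equal_sanitize_for_terminal := by
  intro text _
  unfold Spec_sanitize_for_terminal
  exact pv_ports_agree text
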